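-- pv_equiv track=rewrite | github.com/Arsen1302/Code-copy-detector | TestData/solutions/problem_497_1_1.py | solution_497_1_1
-- ===== SOURCE A (Python) =====
-- from typing import List
--
-- def solution_497_1_1(s: str, words: List[str]) -> int:
--
--     def solution_497_1_2(word):
--         res = []
--
--         n = len(word)
--         i, j = 0, 0
--         while i<=j and j <= n-1:
--             while j <= n-1 and word[j] == word[i]:
--                 j += 1
--             res.append(word[i])
--             res.append(j-i)
--             i = j
--         return res
--
--     t = 0
--     start = solution_497_1_2(s)
--     n = len(start)//2
--     def solution_497_1_3(w):
--         r = solution_497_1_2(w)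
--
--         if len(r) != len(start):
--             return False
--         for i in range(0, 2*n, 2):
--             if start[i] != r[i]:
--                 return False
--             elif start[i] == r[i]:
--                 if start[i+1] < r[i+1]:
--                     return False
--                 elif start[i+1] == r[i+1]:
--                     pass
--                 elif start[i+1] < 3:
--                     return False
--         return True
--
--     for w in words:
--         if solution_497_1_3(w):
--             t += 1
--     return t
-- ===== SOURCE B (Python) =====
-- from typing import List
--
-- def solution_497_1_1(s: str, words: List[str]) -> int:
--     def ok(w):
--         i = j = 0
--         while i < len(s) and j < len(w):
--             if s[i] != w[j]:
--                 return False
--             c = s[i]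
--             i2 = i
--             while i2 < len(s) and s[i2] == c:
--                 i2 += 1
--             j2 = j
--             while j2 < len(w) and w[j2] == c:
--                 j2 += 1
--             cs, cw = i2 - i, j2 - j
--             if cw > cs or (cs > cw and cs < 3):
--                 return False
--             i, j = i2, j2
--         return i == len(s) and j == len(w)
--     return sum(1 for w in words if ok(w))
-- ===== Notes on version B (the rewrite author's own statement) =====
-- stated objective: faster
-- what changed: B drops A's build-both-run-length-lists-then-index-scan check and instead compares each word to s in a single two-pointer pass over the raw characters, advancing both pointers over one run at a time and applying the stretchy rule per run, allocating no intermediate lists.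
import Mathlib
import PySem

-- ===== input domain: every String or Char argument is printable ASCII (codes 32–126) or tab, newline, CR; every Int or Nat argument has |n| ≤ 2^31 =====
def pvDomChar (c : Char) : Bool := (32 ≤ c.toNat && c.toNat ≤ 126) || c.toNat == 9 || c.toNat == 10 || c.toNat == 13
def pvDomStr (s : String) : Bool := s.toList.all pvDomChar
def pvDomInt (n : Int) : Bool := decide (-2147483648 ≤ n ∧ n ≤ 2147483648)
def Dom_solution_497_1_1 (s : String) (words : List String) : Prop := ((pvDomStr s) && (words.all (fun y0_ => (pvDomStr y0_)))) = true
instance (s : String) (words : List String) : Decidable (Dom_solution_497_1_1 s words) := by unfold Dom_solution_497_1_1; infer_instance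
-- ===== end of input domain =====

-- B replaces A's build-two-run-length-lists-then-index-scan check by a single two-pointer
-- pass over s and the word that allocates no intermediate lists (objective: alternative).

-- ===== PORT A =====
-- inner `while j <= n-1 and word[j] == word[i]` of solution_497_1_2 (index always in
-- range under the guard, so getD is exact)
def pvRunEnd (w : List Char) (c : Char) (j : Nat) : Nat :=
  if j < w.length ∧ w.getD j ' ' = c then pvRunEnd w c (j + 1) else j
termination_by w.length - j
decreasing_by omega

-- the port of solution_497_1_2 needs this to terminate
theorem pvRunEnd_ge (w : List Char) (c : Char) (j : Nat) : j ≤ pvRunEnd w c j := by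
  fun_induction pvRunEnd w c j with
  | case1 _ _ ih => omega
  | case2 => omega

theorem pvRunEnd_gt (w : List Char) (c : Char) (j : Nat)
    (h1 : j < w.length) (h2 : w.getD j ' ' = c) : j + 1 ≤ pvRunEnd w c j := by
  rw [pvRunEnd, if_pos ⟨h1, h2⟩]; exact pvRunEnd_ge w c (j + 1)

-- solution_497_1_2: A's flat run-length list [c0, k0, c1, k1, …] is represented as the
-- pair list [(c0,k0), (c1,k1), …] (same values, same order; flat length = 2 × pair length)
def pvRLEAux (w : List Char) (i : Nat) : List (Char × Int) :=
  if h : i < w.length then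
    (w.getD i ' ', (pvRunEnd w (w.getD i ' ') i : Int) - (i : Int)) :: pvRLEAux w (pvRunEnd w (w.getD i ' ') i)
  else []
termination_by w.length - i
decreasing_by have := pvRunEnd_gt w (w.getD i ' ') i h rfl; omega

-- the `for i in range(0, 2*n, 2)` loop of solution_497_1_3, over pair indices k = i/2
def pvCheckFrom (start r : List (Char × Int)) (k : Nat) : Bool :=
  if k < start.length then
    if (start.getD k (' ', 0)).1 ≠ (r.getD k (' ', 0)).1 then false
    else if (start.getD k (' ', 0)).2 < (r.getD k (' ', 0)).2 then false
    else if (start.getD k (' ', 0)).2 = (r.getD k (' ', 0)).2 then pvCheckFrom start r (k + 1)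
    else if (start.getD k (' ', 0)).2 < 3 then false
    else pvCheckFrom start r (k + 1)
  else true
termination_by start.length - k
decreasing_by all_goals omega

-- solution_497_1_3 (len(r) != len(start) on the flat lists ⟺ on the pair lists)
def pvCheck3 (start r : List (Char × Int)) : Bool :=
  if r.length ≠ start.length then false else pvCheckFrom start r 0

def solution_497_1_1 (s : String) (words : List String) : Int :=
  words.foldl (fun t w =>
    if pvCheck3 (pvRLEAux s.toList 0) (pvRLEAux w.toList 0) then t + 1 else t) 0

-- ===== PORT B =====
-- the two inner `while … == c` scans of Source B's ok (index in range under the guard)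
def pvScanRun (xs : List Char) (c : Char) (k : Nat) : Nat :=
  if k < xs.length ∧ xs.getD k ' ' = c then pvScanRun xs c (k + 1) else k
termination_by xs.length - k
decreasing_by omega

theorem pvScanRun_ge (xs : List Char) (c : Char) (k : Nat) : k ≤ pvScanRun xs c k := by
  fun_induction pvScanRun xs c k with
  | case1 _ _ ih => omega
  | case2 => omega

theorem pvScanRun_gt (xs : List Char) (c : Char) (k : Nat)
    (h1 : k < xs.length) (h2 : xs.getD k ' ' = c) : k + 1 ≤ pvScanRun xs c k := by
  rw [pvScanRun, if_pos ⟨h1, h2⟩]; exact pvScanRun_ge xs c (k + 1)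

-- Source B's ok: one two-pointer pass, no lists built
def pvTpAux (s w : List Char) (i j : Nat) : Bool :=
  if h : i < s.length ∧ j < w.length then
    if w.getD j ' ' ≠ s.getD i ' ' then false
    else
      if ((pvScanRun w (s.getD i ' ') j : Int) - (j : Int)) > ((pvScanRun s (s.getD i ' ') i : Int) - (i : Int))
         ∨ (((pvScanRun s (s.getD i ' ') i : Int) - (i : Int)) > ((pvScanRun w (s.getD i ' ') j : Int) - (j : Int))
            ∧ ((pvScanRun s (s.getD i ' ') i : Int) - (i : Int)) < 3) then false
      else pvTpAux s w (pvScanRun s (s.getD i ' ') i) (pvScanRun w (s.getD i ' ') j)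
  else decide (i = s.length ∧ j = w.length)
termination_by s.length - i
decreasing_by have := pvScanRun_gt s (s.getD i ' ') i h.1 rfl; omega

def solution_497_1_1_alt (s : String) (words : List String) : Int :=
  words.foldl (fun t w => if pvTpAux s.toList w.toList 0 0 then t + 1 else t) 0

-- ===== PRECONDITION & SPEC =====
def Spec_solution_497_1_1 (s : String) (words : List String) (out : Int) : Prop := out = solution_497_1_1_alt s words
instance (s : String) (words : List String) (out : Int) : Decidable (Spec_solution_497_1_1 s words out) := by unfold Spec_solution_497_1_1; infer_instance

-- ===== CLAIM (what is proved, stated in full; the proofs are below) =====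
def Claim_equal_solution_497_1_1 : Prop := ∀ (s : String) (words : List String), Dom_solution_497_1_1 s words → Spec_solution_497_1_1 s words (solution_497_1_1 s words)

-- ===== LEMMAS AND PROOFS =====

-- structural version of A's index-based comparison
def pvPairCheck : List (Char × Int) → List (Char × Int) → Bool
  | [], [] => true
  | _ :: _, [] => false
  | [], _ :: _ => false
  | (c1, n1) :: t1, (c2, n2) :: t2 =>
    if c1 ≠ c2 then false
    else if n1 < n2 then false
    else if n1 = n2 then pvPairCheck t1 t2
    else if n1 < 3 then false
    else pvPairCheck t1 t2

theorem pvRLEAux_nil (xs : List Char) (k : Nat) (h : ¬ k < xs.length) :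
    pvRLEAux xs k = [] := by
  conv_lhs => rw [pvRLEAux]
  rw [dif_neg h]

theorem pvRLEAux_cons (xs : List Char) (k : Nat) (h : k < xs.length) :
    pvRLEAux xs k = (xs.getD k ' ', (pvRunEnd xs (xs.getD k ' ') k : Int) - (k : Int)) ::
      pvRLEAux xs (pvRunEnd xs (xs.getD k ' ') k) := by
  conv_lhs => rw [pvRLEAux]
  rw [dif_pos h]

theorem pvPairCheck_len {a b : List (Char × Int)} (h : a.length ≠ b.length) :
    pvPairCheck a b = false := by
  induction a generalizing b with
  | nil => cases b with
    | nil => simp at h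
    | cons q t2 => simp [pvPairCheck]
  | cons p t1 ih =>
    cases b with
    | nil => simp [pvPairCheck]
    | cons q t2 =>
      obtain ⟨c1, n1⟩ := p; obtain ⟨c2, n2⟩ := q
      have : t1.length ≠ t2.length := by simpa using h
      simp only [pvPairCheck]
      split_ifs <;> simp [ih this]

theorem pvCheckFrom_shift (p q : Char × Int) (t1 t2 : List (Char × Int)) (k : Nat) :
    pvCheckFrom (p :: t1) (q :: t2) (k + 1) = pvCheckFrom t1 t2 k := by
  fun_induction pvCheckFrom t1 t2 k with
  | case1 k hk h1 => rw [pvCheckFrom]; simp_all [Nat.succ_lt_succ hk]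
  | case2 k hk h1 h2 => rw [pvCheckFrom]; simp_all [Nat.succ_lt_succ hk]
  | case3 k hk h1 h2 h3 ih => rw [pvCheckFrom]; simp_all [Nat.succ_lt_succ hk]
  | case4 k hk h1 h2 h3 h4 => rw [pvCheckFrom]; simp_all [Nat.succ_lt_succ hk]
  | case5 k hk h1 h2 h3 h4 ih =>
      rw [pvCheckFrom]
      simp_all [Nat.succ_lt_succ hk]
      simp [not_lt.2 h2, not_lt.2 h4]
  | case6 k hk => rw [pvCheckFrom]; simp_all

theorem pvCheck3_eq_pairCheck (a b : List (Char × Int)) :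
    pvCheck3 a b = pvPairCheck a b := by
  induction a generalizing b with
  | nil => cases b with
    | nil => simp [pvCheck3, pvCheckFrom, pvPairCheck]
    | cons q t2 => simp [pvCheck3, pvPairCheck]
  | cons p t1 ih =>
    cases b with
    | nil => simp [pvCheck3, pvPairCheck]
    | cons q t2 =>
      obtain ⟨c1, n1⟩ := p; obtain ⟨c2, n2⟩ := q
      have hstep : pvCheckFrom ((c1, n1) :: t1) ((c2, n2) :: t2) 0 =
          (if c1 ≠ c2 then false
           else if n1 < n2 then false
           else if n1 = n2 then pvCheckFrom t1 t2 0
           else if n1 < 3 then false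
           else pvCheckFrom t1 t2 0) := by
        conv_lhs => rw [pvCheckFrom]
        simp only [List.length_cons, Nat.succ_pos, if_pos, List.getD_cons_zero,
          Nat.zero_add, pvCheckFrom_shift]
      by_cases hl : t2.length = t1.length
      · have hc : pvCheckFrom t1 t2 0 = pvPairCheck t1 t2 := by
          have := ih t2
          rw [pvCheck3, if_neg (not_not_intro hl)] at this
          exact this
        have hl' : ¬ (((c2, n2) :: t2).length ≠ ((c1, n1) :: t1).length) := by
          simp [hl]
        rw [pvCheck3, if_neg hl', hstep, hc]
        simp only [pvPairCheck]
      · have hr : pvPairCheck t1 t2 = false := pvPairCheck_len (fun h => hl h.symm)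
        have hne : pvPairCheck ((c1, n1) :: t1) ((c2, n2) :: t2) = false := by
          simp only [pvPairCheck]
          split_ifs <;> simp [hr]
        rw [pvCheck3, if_pos (by simp only [List.length_cons]; omega), hne]

theorem pvScanRun_eq_runEnd (xs : List Char) (c : Char) (k : Nat) :
    pvScanRun xs c k = pvRunEnd xs c k := by
  fun_induction pvScanRun xs c k with
  | case1 k h ih => rw [pvRunEnd, if_pos h]; exact ih
  | case2 k h => rw [pvRunEnd, if_neg h]

theorem pvRunEnd_le (xs : List Char) (c : Char) (k : Nat) (h : k ≤ xs.length) :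
    pvRunEnd xs c k ≤ xs.length := by
  fun_induction pvRunEnd xs c k with
  | case1 k hg ih => exact ih hg.1
  | case2 => exact h

theorem pvTp_eq (s w : List Char) (n i j : Nat)
    (hn : s.length - i ≤ n) (hi : i ≤ s.length) (hj : j ≤ w.length) :
    pvTpAux s w i j = pvPairCheck (pvRLEAux s i) (pvRLEAux w j) := by
  induction n generalizing i j with
  | zero =>
    have hie : i = s.length := by omega
    rw [pvTpAux, dif_neg (by omega : ¬ (i < s.length ∧ j < w.length))]
    rw [pvRLEAux_nil s i (by omega)]
    by_cases hje : j = w.length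
    · rw [pvRLEAux_nil w j (by omega)]
      simp [pvPairCheck, hie, hje]
    · rw [pvRLEAux_cons w j (by omega)]
      simp [pvPairCheck, hje]
  | succ n ihn =>
    by_cases hg : i < s.length ∧ j < w.length
    · obtain ⟨hil, hjl⟩ := hg
      rw [pvTpAux, dif_pos ⟨hil, hjl⟩]
      rw [pvRLEAux_cons s i hil, pvRLEAux_cons w j hjl]
      by_cases hch : w.getD j ' ' = s.getD i ' '
      · rw [if_neg (not_not_intro hch)]
        rw [pvScanRun_eq_runEnd, pvScanRun_eq_runEnd, hch]
        have hi2 := pvRunEnd_gt s (s.getD i ' ') i hil rfl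
        have hj2 := pvRunEnd_gt w (s.getD i ' ') j hjl (by rw [hch])
        have hi2le := pvRunEnd_le s (s.getD i ' ') i (le_of_lt hil)
        have hj2le := pvRunEnd_le w (s.getD i ' ') j (le_of_lt hjl)
        have hrec := ihn (pvRunEnd s (s.getD i ' ') i) (pvRunEnd w (s.getD i ' ') j)
          (by omega) hi2le hj2le
        set cs : Int := (pvRunEnd s (s.getD i ' ') i : Int) - (i : Int) with hcs
        set cw : Int := (pvRunEnd w (s.getD i ' ') j : Int) - (j : Int) with hcw
        simp only [pvPairCheck, ne_eq, not_true_eq_false, if_false]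
        by_cases hbad : cw > cs ∨ (cs > cw ∧ cs < 3)
        · rw [if_pos hbad]
          rcases hbad with hlt | ⟨hgt, h3⟩
          · rw [if_pos hlt]
          · rw [if_neg (by omega), if_neg (by omega), if_pos h3]
        · rw [if_neg hbad]
          push_neg at hbad
          obtain ⟨hle, himp⟩ := hbad
          by_cases heq : cs = cw
          · rw [if_neg (by omega), if_pos heq, hrec]
          · rw [if_neg (by omega), if_neg heq,
              if_neg (by have := himp (by omega); omega), hrec]
      · rw [if_pos hch]
        simp only [pvPairCheck]
        rw [if_pos (show s.getD i ' ' ≠ w.getD j ' ' from fun h => hch h.symm)]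
    · rw [pvTpAux, dif_neg hg]
      by_cases hie : i < s.length
      · have hje : j = w.length := by
          rcases Nat.lt_or_ge j w.length with h | h
          · exact absurd ⟨hie, h⟩ hg
          · omega
        rw [pvRLEAux_cons s i hie, pvRLEAux_nil w j (by omega)]
        simp [pvPairCheck]
        omega
      · have hie' : i = s.length := by omega
        rw [pvRLEAux_nil s i hie]
        by_cases hje : j = w.length
        · rw [pvRLEAux_nil w j (by omega)]
          simp [pvPairCheck, hie', hje]
        · rw [pvRLEAux_cons w j (by omega)]
          simp [pvPairCheck, hje]

theorem pvPerWord (s w : String) :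
    pvCheck3 (pvRLEAux s.toList 0) (pvRLEAux w.toList 0) = pvTpAux s.toList w.toList 0 0 := by
  rw [pvCheck3_eq_pairCheck,
    pvTp_eq s.toList w.toList s.toList.length 0 0 (by omega) (by omega) (by omega)]

theorem pvFold_eq (s : String) (words : List String) (t : Int) :
    words.foldl (fun t w => if pvCheck3 (pvRLEAux s.toList 0) (pvRLEAux w.toList 0) then t + 1 else t) t =
    words.foldl (fun t w => if pvTpAux s.toList w.toList 0 0 then t + 1 else t) t := by
  induction words generalizing t with
  | nil => rfl
  | cons w ws ih => simp only [List.foldl_cons, pvPerWord s w]; exact ih _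

-- ===== VERDICT (by name: the statement is the Claim_ definition above) =====
theorem solution_497_1_1_spec : Claim_equal_solution_497_1_1 := by
  intro s words _
  unfold Spec_solution_497_1_1 solution_497_1_1 solution_497_1_1_alt
  exact pvFold_eq s words 0
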